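-- pv_equiv track=rewrite | github.com/dcmshi/oly-program-generator | oly-agent/web/app.py | _parse_rationale
-- ===== SOURCE A (Python) =====
-- def _parse_rationale(text: str) -> list[dict]:
--     """Split rationale text into {heading, body} sections on # lines."""
--     sections: list[dict] = []
--     heading: str | None = None
--     lines: list[str] = []
--     for line in text.splitlines():
--         if line.startswith("#"):
--             if heading is not None or lines:
--                 sections.append({"heading": heading, "body": "\n".join(lines).strip()})
--             heading = line.lstrip("#").strip()
--             lines = []
--         else:
--             lines.append(line)
--     if heading is not None or lines:
--         sections.append({"heading": heading, "body": "\n".join(lines).strip()})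
--     return sections
-- ===== SOURCE B (Python) =====
-- def _parse_rationale(text: str) -> list[dict]:
--     """Split rationale text into {heading, body} sections on # lines.
--
--     Different decomposition: group the lines with takeWhile/dropWhile at heading
--     lines instead of a fold with (heading, pending-lines) state.
--     """
--     lines = text.splitlines()
--
--     def is_hash(line: str) -> bool:
--         return line.startswith("#")
--
--     def split_body(ls: list[str]) -> tuple[list[str], list[str]]:
--         i = 0
--         while i < len(ls) and not is_hash(ls[i]):
--             i += 1
--         return ls[:i], ls[i:]
--
--     def section(heading, body_lines):
--         return {"heading": heading, "body": "\n".join(body_lines).strip()}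
--
--     body0, rest = split_body(lines)
--     sections = [section(None, body0)] if body0 else []
--     while rest:
--         head, tail = rest[0], rest[1:]
--         body, rest = split_body(tail)
--         sections.append(section(head.lstrip("#").strip(), body))
--     return sections
-- ===== Notes on version B (the rewrite author's own statement) =====
-- stated objective: alternative
-- what changed: Replaces A's stateful fold (carrying the pending heading and body lines and flushing at each heading line plus a final flush) with a grouping decomposition: split the line list at heading lines via takeWhile/dropWhile, emit the leading no-heading segment only if non-empty, then one section per heading group.
import Mathlib
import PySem

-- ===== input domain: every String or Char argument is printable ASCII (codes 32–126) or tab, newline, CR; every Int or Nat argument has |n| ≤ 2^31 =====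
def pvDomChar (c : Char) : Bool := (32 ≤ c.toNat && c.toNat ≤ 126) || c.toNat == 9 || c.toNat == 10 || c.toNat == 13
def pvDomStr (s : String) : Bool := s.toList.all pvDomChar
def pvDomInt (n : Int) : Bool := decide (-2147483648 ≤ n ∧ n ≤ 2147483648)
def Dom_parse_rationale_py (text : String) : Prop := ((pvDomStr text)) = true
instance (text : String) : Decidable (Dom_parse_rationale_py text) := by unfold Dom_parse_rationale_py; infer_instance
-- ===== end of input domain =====

-- B replaces A's stateful flush-on-heading fold by a takeWhile/dropWhile grouping of the lines (alternative decomposition, same cost).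


-- ===== PORT A =====
-- line.lstrip("#"): drop leading '#' characters (hand-ported; exact — Python lstrip with a
-- one-character set removes exactly the maximal leading run of that character)
def pvLstripHash (s : String) : String := String.ofList (s.toList.dropWhile (fun c => c == '#'))

-- {"heading": h, "body": "\n".join(ls).strip()} as an association list
def pvMkSecA (h : Option String) (ls : List String) : List (String × Option String) :=
  [("heading", h), ("body", some (PySem.Str.strip (PySem.Str.join "\n" ls)))]

-- the body of A's for-loop, on state (sections, heading, lines)
def pvStepA (st : List (List (String × Option String)) × Option String × List String)
    (line : String) : List (List (String × Option String)) × Option String × List String :=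
  let (sections, heading, lines) := st
  if PySem.Str.startswith line "#" = true then
    let sections := if heading.isSome = true ∨ lines ≠ [] then sections ++ [pvMkSecA heading lines] else sections
    (sections, some (PySem.Str.strip (pvLstripHash line)), [])
  else
    (sections, heading, lines ++ [line])

-- the trailing "if heading is not None or lines: sections.append(...)"
def pvFinalA (st : List (List (String × Option String)) × Option String × List String) :
    List (List (String × Option String)) :=
  let (sections, heading, lines) := st
  if heading.isSome = true ∨ lines ≠ [] then sections ++ [pvMkSecA heading lines] else sections

def parse_rationale_py (text : String) : List (List (String × Option String)) :=
  pvFinalA ((PySem.Str.splitlines text).foldl pvStepA ([], none, []))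

-- ===== PORT B =====
def pvIsHash (line : String) : Bool := PySem.Str.startswith line "#"

def pvSectionB (heading : Option String) (bodyLines : List String) : List (String × Option String) :=
  [("heading", heading), ("body", some (PySem.Str.strip (PySem.Str.join "\n" bodyLines)))]

-- split_body: leading non-# lines, then the rest (starting at the next # line)
def pvSplitBody (ls : List String) : List String × List String :=
  (ls.takeWhile (fun l => !pvIsHash l), ls.dropWhile (fun l => !pvIsHash l))

-- the while-loop over the remaining groups: rest always starts with a # line
def pvGroupsB : List String → List (List (String × Option String))
  | [] => []
  | head :: tail =>
    pvSectionB (some (PySem.Str.strip (pvLstripHash head))) (pvSplitBody tail).1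
      :: pvGroupsB (pvSplitBody tail).2
termination_by ls => ls.length
decreasing_by
  simp only [pvSplitBody, List.length_cons]
  exact Nat.lt_succ_of_le (List.length_dropWhile_le _ _)

def parse_rationale_py_alt (text : String) : List (List (String × Option String)) :=
  let lines := PySem.Str.splitlines text
  let (body0, rest) := pvSplitBody lines
  (if body0 = [] then [] else [pvSectionB none body0]) ++ pvGroupsB rest

-- ===== PRECONDITION & SPEC =====
def Spec_parse_rationale_py (text : String) (out : List (List (String × Option String))) : Prop := out = parse_rationale_py_alt text
instance (text : String) (out : List (List (String × Option String))) : Decidable (Spec_parse_rationale_py text out) := by unfold Spec_parse_rationale_py; infer_instance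

-- ===== CLAIM (what is proved, stated in full; the proofs are below) =====
def Claim_equal_parse_rationale_py : Prop := ∀ (text : String), Dom_parse_rationale_py text → Spec_parse_rationale_py text (parse_rationale_py text)

-- ===== LEMMAS AND PROOFS =====

-- the two section builders are the same record
theorem pvSec_eq (h : Option String) (ls : List String) : pvMkSecA h ls = pvSectionB h ls := rfl

@[simp] theorem pvGroupsB_nil : pvGroupsB [] = [] := by unfold pvGroupsB; rfl

theorem pvGroupsB_cons (hd : String) (t : List String) :
    pvGroupsB (hd :: t) =
      pvSectionB (some (PySem.Str.strip (pvLstripHash hd))) (t.takeWhile (fun l => !pvIsHash l))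
        :: pvGroupsB (t.dropWhile (fun l => !pvIsHash l)) := by
  rw [pvGroupsB.eq_def]
  simp [pvSplitBody]

-- invariant with a pending heading: the fold flushes exactly one section for the
-- current group, then behaves like pvGroupsB on the remaining # groups
theorem pvFold_some (ls : List String) : ∀ (secs : List (List (String × Option String)))
    (h : String) (cur : List String),
    pvFinalA (ls.foldl pvStepA (secs, some h, cur)) =
      secs ++ pvSectionB (some h) (cur ++ ls.takeWhile (fun l => !pvIsHash l))
        :: pvGroupsB (ls.dropWhile (fun l => !pvIsHash l)) := by
  induction ls with
  | nil =>
    intro secs h cur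
    simp [pvFinalA, pvSec_eq]
  | cons l t ih =>
    intro secs h cur
    by_cases hl : pvIsHash l = true
    · have hs : PySem.Chars.startswith l.toList ['#'] = true := by simpa [pvIsHash] using hl
      rw [List.foldl_cons,
        show pvStepA (secs, some h, cur) l
            = (secs ++ [pvMkSecA (some h) cur], some (PySem.Str.strip (pvLstripHash l)), [])
          from by simp [pvStepA, hs],
        ih]
      simp [hl, pvGroupsB_cons, pvSec_eq]
    · have hs : PySem.Chars.startswith l.toList ['#'] = false := by
        simpa [pvIsHash] using hl
      rw [List.foldl_cons,
        show pvStepA (secs, some h, cur) l = (secs, some h, cur ++ [l])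
          from by simp [pvStepA, hs],
        ih]
      have hlf : pvIsHash l = false := by simpa using hl
      simp [hlf, List.append_assoc]

-- invariant before the first heading: flush the leading group only if non-empty
theorem pvFold_none (ls : List String) : ∀ (secs : List (List (String × Option String)))
    (cur : List String),
    pvFinalA (ls.foldl pvStepA (secs, none, cur)) =
      secs ++ (if cur ++ ls.takeWhile (fun l => !pvIsHash l) = [] then []
               else [pvSectionB none (cur ++ ls.takeWhile (fun l => !pvIsHash l))])
        ++ pvGroupsB (ls.dropWhile (fun l => !pvIsHash l)) := by
  induction ls with
  | nil =>
    intro secs cur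
    by_cases hc : cur = []
    · simp [pvFinalA, hc]
    · simp [pvFinalA, hc, pvSec_eq]
  | cons l t ih =>
    intro secs cur
    by_cases hl : pvIsHash l = true
    · have hs : PySem.Chars.startswith l.toList ['#'] = true := by simpa [pvIsHash] using hl
      by_cases hc : cur = []
      · rw [List.foldl_cons,
          show pvStepA (secs, none, cur) l
              = (secs, some (PySem.Str.strip (pvLstripHash l)), [])
            from by simp [pvStepA, hs, hc],
          pvFold_some]
        simp [hl, hc, pvGroupsB_cons]
      · rw [List.foldl_cons,
          show pvStepA (secs, none, cur) l
              = (secs ++ [pvMkSecA none cur], some (PySem.Str.strip (pvLstripHash l)), [])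
            from by simp [pvStepA, hs, hc],
          pvFold_some]
        simp [hl, hc, pvGroupsB_cons, pvSec_eq]
    · have hs : PySem.Chars.startswith l.toList ['#'] = false := by
        simpa [pvIsHash] using hl
      rw [List.foldl_cons,
        show pvStepA (secs, none, cur) l = (secs, none, cur ++ [l])
          from by simp [pvStepA, hs],
        ih]
      have hlf : pvIsHash l = false := by simpa using hl
      simp [hlf, List.append_assoc]

-- ===== VERDICT (by name: the statement is the Claim_ definition above) =====
theorem parse_rationale_py_spec : Claim_equal_parse_rationale_py := by
  intro text _
  unfold Spec_parse_rationale_py parse_rationale_py parse_rationale_py_alt pvSplitBody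
  simpa using pvFold_none (PySem.Str.splitlines text) [] []
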